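-- pv_equiv track=rewrite | github.com/shrilakshmikakati/E-contract-to-smart-contract | src/realtime/validator.py | _get_security_recommendations
-- ===== SOURCE A (Python) =====
-- from typing import Dict, List, Optional, Tuple, Any
--
-- def _get_security_recommendations(vulnerabilities: List[str]) -> List[str]:
--     """Get security recommendations based on found vulnerabilities"""
--     recommendations = []
--
--     for vuln in vulnerabilities:
--         if 'reentrancy' in vuln.lower():
--             recommendations.append("Implement ReentrancyGuard from OpenZeppelin")
--         elif 'overflow' in vuln.lower():
--             recommendations.append("Use SafeMath library or Solidity ^0.8.0")
--         elif 'tx.origin' in vuln.lower():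
--             recommendations.append("Replace tx.origin with msg.sender")
--         elif 'access control' in vuln.lower():
--             recommendations.append("Implement proper access control with modifiers")
--         elif 'external calls' in vuln.lower():
--             recommendations.append("Check return values of external calls")
--
--     return recommendations
-- ===== SOURCE B (Python) =====
-- RULES = [
--     ('reentrancy', "Implement ReentrancyGuard from OpenZeppelin"),
--     ('overflow', "Use SafeMath library or Solidity ^0.8.0"),
--     ('tx.origin', "Replace tx.origin with msg.sender"),
--     ('access control', "Implement proper access control with modifiers"),
--     ('external calls', "Check return values of external calls"),
-- ]
--
-- def _get_security_recommendations(vulnerabilities):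
--     # Rule-major staged passes: one pass over the inputs per rule, filling
--     # each position at most once (first rule to fill a slot wins, which is
--     # exactly the elif priority); vuln-major order of the output is kept
--     # because results is positional.
--     lows = [v.lower() for v in vulnerabilities]
--     results = [None] * len(lows)
--     for key, rec in RULES:
--         for i, low in enumerate(lows):
--             if results[i] is None and key in low:
--                 results[i] = rec
--     return [r for r in results if r is not None]
-- ===== Notes on version B (the rewrite author's own statement) =====
-- stated objective: alternative
-- what changed: Replaces A's single vuln-major pass with an if/elif ladder by a rule-major algorithm: five staged passes over the lowercased inputs, each filling still-empty slots of a positional results array, then compacting; priority is preserved because an earlier rule's fill is never overwritten.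
import Mathlib
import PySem

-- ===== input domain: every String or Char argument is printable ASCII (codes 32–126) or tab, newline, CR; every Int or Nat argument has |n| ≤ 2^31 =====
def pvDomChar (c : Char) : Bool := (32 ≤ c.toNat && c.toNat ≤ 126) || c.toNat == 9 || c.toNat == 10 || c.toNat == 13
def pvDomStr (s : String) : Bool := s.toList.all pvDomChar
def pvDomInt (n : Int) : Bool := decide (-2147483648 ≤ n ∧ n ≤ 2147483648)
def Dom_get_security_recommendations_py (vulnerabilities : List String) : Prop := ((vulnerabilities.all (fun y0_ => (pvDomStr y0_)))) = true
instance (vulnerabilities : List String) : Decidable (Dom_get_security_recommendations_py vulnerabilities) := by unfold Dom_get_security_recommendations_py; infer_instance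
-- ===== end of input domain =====

-- B replaces A's vuln-major if/elif ladder by rule-major staged passes filling a positional results array (alternative decomposition, same cost). Equivalence proved on the full domain.


-- ===== PORT A =====
def get_security_recommendations_py (vulnerabilities : List String) : List String :=
  vulnerabilities.foldl (fun recommendations vuln =>
    if PySem.Str.isIn "reentrancy" (PySem.Str.lower vuln) then
      recommendations ++ ["Implement ReentrancyGuard from OpenZeppelin"]
    else if PySem.Str.isIn "overflow" (PySem.Str.lower vuln) then
      recommendations ++ ["Use SafeMath library or Solidity ^0.8.0"]
    else if PySem.Str.isIn "tx.origin" (PySem.Str.lower vuln) then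
      recommendations ++ ["Replace tx.origin with msg.sender"]
    else if PySem.Str.isIn "access control" (PySem.Str.lower vuln) then
      recommendations ++ ["Implement proper access control with modifiers"]
    else if PySem.Str.isIn "external calls" (PySem.Str.lower vuln) then
      recommendations ++ ["Check return values of external calls"]
    else recommendations) []

-- ===== PORT B =====
-- B-side helpers: the ordered rule table (Python RULES)
def pvRules : List (String × String) :=
  [("reentrancy", "Implement ReentrancyGuard from OpenZeppelin"),
   ("overflow", "Use SafeMath library or Solidity ^0.8.0"),
   ("tx.origin", "Replace tx.origin with msg.sender"),
   ("access control", "Implement proper access control with modifiers"),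
   ("external calls", "Check return values of external calls")]

-- the inner pass of B: one rule (key, rec) swept over the positional results, filling empty slots
-- (Python's 'for i, low in enumerate(lows): if results[i] is None and key in low: results[i] = rec',
--  transcribed as a positional zipWith of results with lows)
def pvFill (p : String × String) (res : List (Option String)) (lows : List String) : List (Option String) :=
  List.zipWith (fun r low => if r.isNone && PySem.Str.isIn p.1 low then some p.2 else r) res lows

def get_security_recommendations_py_alt (vulnerabilities : List String) : List String :=
  let lows := vulnerabilities.map PySem.Str.lower
  let results := pvRules.foldl (fun res p => pvFill p res lows) (lows.map (fun _ => (none : Option String)))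
  results.filterMap id

-- ===== PRECONDITION & SPEC =====
def Spec_get_security_recommendations_py (vulnerabilities : List String) (out : List String) : Prop := out = get_security_recommendations_py_alt vulnerabilities
instance (vulnerabilities : List String) (out : List String) : Decidable (Spec_get_security_recommendations_py vulnerabilities out) := by unfold Spec_get_security_recommendations_py; infer_instance

-- ===== CLAIM (what is proved, stated in full; the proofs are below) =====
def Claim_equal_get_security_recommendations_py : Prop := ∀ (vulnerabilities : List String), Dom_get_security_recommendations_py vulnerabilities → Spec_get_security_recommendations_py vulnerabilities (get_security_recommendations_py vulnerabilities)

-- ===== LEMMAS AND PROOFS =====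
-- the per-position step of one fill pass, and the first-match it computes
def pvStep (low : String) (r : Option String) (p : String × String) : Option String :=
  if r.isNone && PySem.Str.isIn p.1 low then some p.2 else r

def pvFirstMatch (low : String) : Option String :=
  (pvRules.find? (fun p => PySem.Str.isIn p.1 low)).map Prod.snd

theorem pv_zipWith_map_self {α β : Type} (g : α → β → α) (f : β → α) :
    ∀ (l : List β), List.zipWith g (l.map f) l = l.map (fun b => g (f b) b)
  | [] => rfl
  | b :: l => by simp [List.zipWith, pv_zipWith_map_self g f l]

theorem pv_fill_map (rs : List (String × String)) (lows : List String) (f : String → Option String) :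
    rs.foldl (fun res p => pvFill p res lows) (lows.map f)
      = lows.map (fun low => rs.foldl (pvStep low) (f low)) := by
  induction rs generalizing f with
  | nil => simp
  | cons p rs ih =>
    simp only [List.foldl_cons]
    have h : pvFill p (lows.map f) lows
        = lows.map (fun low => pvStep low (f low) p) := by
      simp [pvFill, pvStep, pv_zipWith_map_self]
    rw [h, ih]

theorem pv_foldl_some (low : String) (rs : List (String × String)) (x : String) :
    rs.foldl (pvStep low) (some x) = some x := by
  induction rs with
  | nil => rfl
  | cons p rs ih => simp [List.foldl_cons, pvStep, ih]

theorem pv_foldl_none (low : String) (rs : List (String × String)) :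
    rs.foldl (pvStep low) none = (rs.find? (fun p => PySem.Str.isIn p.1 low)).map Prod.snd := by
  induction rs with
  | nil => rfl
  | cons p rs ih =>
    by_cases h : PySem.Chars.isIn p.1.toList low.toList = true
    · simp [List.foldl_cons, pvStep, PySem.Str.isIn, h, pv_foldl_some, List.find?]
    · simp [List.foldl_cons, pvStep, PySem.Str.isIn, h, ih, List.find?]

theorem pv_alt_eq (vs : List String) :
    get_security_recommendations_py_alt vs = vs.filterMap (fun v => pvFirstMatch (PySem.Str.lower v)) := by
  unfold get_security_recommendations_py_alt
  simp only [pv_fill_map]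
  simp [pvFirstMatch, pv_foldl_none, List.filterMap_map, Function.comp_def]

theorem pv_step_eq (v : String) (acc : List String) :
    (if PySem.Str.isIn "reentrancy" (PySem.Str.lower v) then
      acc ++ ["Implement ReentrancyGuard from OpenZeppelin"]
    else if PySem.Str.isIn "overflow" (PySem.Str.lower v) then
      acc ++ ["Use SafeMath library or Solidity ^0.8.0"]
    else if PySem.Str.isIn "tx.origin" (PySem.Str.lower v) then
      acc ++ ["Replace tx.origin with msg.sender"]
    else if PySem.Str.isIn "access control" (PySem.Str.lower v) then
      acc ++ ["Implement proper access control with modifiers"]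
    else if PySem.Str.isIn "external calls" (PySem.Str.lower v) then
      acc ++ ["Check return values of external calls"]
    else acc) = acc ++ (pvFirstMatch (PySem.Str.lower v)).toList := by
  simp only [pvFirstMatch, pvRules, List.find?]
  split_ifs <;> simp_all

theorem pv_main (vs : List String) (acc : List String) :
    vs.foldl (fun recommendations vuln =>
    if PySem.Str.isIn "reentrancy" (PySem.Str.lower vuln) then
      recommendations ++ ["Implement ReentrancyGuard from OpenZeppelin"]
    else if PySem.Str.isIn "overflow" (PySem.Str.lower vuln) then
      recommendations ++ ["Use SafeMath library or Solidity ^0.8.0"]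
    else if PySem.Str.isIn "tx.origin" (PySem.Str.lower vuln) then
      recommendations ++ ["Replace tx.origin with msg.sender"]
    else if PySem.Str.isIn "access control" (PySem.Str.lower vuln) then
      recommendations ++ ["Implement proper access control with modifiers"]
    else if PySem.Str.isIn "external calls" (PySem.Str.lower vuln) then
      recommendations ++ ["Check return values of external calls"]
    else recommendations) acc = acc ++ vs.filterMap (fun v => pvFirstMatch (PySem.Str.lower v)) := by
  induction vs generalizing acc with
  | nil => simp
  | cons v vs ih =>
    simp only [List.foldl_cons, List.filterMap_cons]
    rw [ih, pv_step_eq]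
    cases pvFirstMatch (PySem.Str.lower v) <;> simp

-- ===== VERDICT (by name: the statement is the Claim_ definition above) =====
theorem get_security_recommendations_py_spec : Claim_equal_get_security_recommendations_py := by
  intro vs _
  show get_security_recommendations_py vs = get_security_recommendations_py_alt vs
  rw [pv_alt_eq]
  unfold get_security_recommendations_py
  simpa using pv_main vs []
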